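-- pv_equiv track=rewrite | github.com/LCLeGoff/CrazyantDataStructure | Tools/MiscellaneousTools/ArrayManipulation.py | get_index_interval_containing
-- ===== SOURCE A (Python) =====
-- def get_index_interval_containing(value, interval_beginnings):
--     i = 0
--     while i < len(interval_beginnings) and value >= interval_beginnings[i]:
--         i += 1
--
--     i -= 1
--     if i == -1:
--         return None
--     else:
--         return i
-- ===== SOURCE B (Python) =====
-- def get_index_interval_containing(value, interval_beginnings):
--     lo, hi = 0, len(interval_beginnings)
--     while lo < hi:
--         mid = (lo + hi) // 2
--         if interval_beginnings[mid] <= value: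
--             lo = mid + 1
--         else:
--             hi = mid
--     return lo - 1 if lo else None
-- ===== Notes on version B (the rewrite author's own statement) =====
-- stated objective: faster
-- what changed: Replaces A's linear left-to-right scan by a hand-rolled binary search (bisect_right - 1); equivalence is claimed on inputs where the list is partitioned w.r.t. value (in particular all ascending interval-beginning lists), binary search's precondition.
-- outside the precondition, e.g. on get_index_interval_containing(5, [10, 0, 0]): A returns None, B returns 2
import Mathlib
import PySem

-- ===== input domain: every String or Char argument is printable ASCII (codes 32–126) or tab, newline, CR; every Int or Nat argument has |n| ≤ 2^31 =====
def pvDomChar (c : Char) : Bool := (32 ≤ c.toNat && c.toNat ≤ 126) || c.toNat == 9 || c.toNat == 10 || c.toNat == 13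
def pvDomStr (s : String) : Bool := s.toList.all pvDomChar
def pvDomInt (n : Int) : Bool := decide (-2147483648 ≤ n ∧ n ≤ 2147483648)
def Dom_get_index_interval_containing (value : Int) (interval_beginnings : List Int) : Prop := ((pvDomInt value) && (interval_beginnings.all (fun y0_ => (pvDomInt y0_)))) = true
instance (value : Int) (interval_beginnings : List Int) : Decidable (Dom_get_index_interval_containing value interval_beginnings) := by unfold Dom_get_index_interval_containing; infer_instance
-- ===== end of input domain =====

-- B replaces A's O(n) linear scan by an O(log n) binary search (bisect_right - 1)
-- over the ascending interval beginnings; equivalence is claimed on sorted input only.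

-- ===== PORT A =====
-- the while loop: i advances while i < len and value >= interval_beginnings[i]
def pvLoopA (value : Int) (xs : List Int) (i : Nat) : Nat :=
  if h : i < xs.length then
    if value ≥ xs[i] then pvLoopA value xs (i + 1) else i
  else i
termination_by xs.length - i

def get_index_interval_containing (value : Int) (interval_beginnings : List Int) : Option Int :=
  let i : Int := (pvLoopA value interval_beginnings 0 : Int) - 1
  if i = -1 then none else some i

-- ===== PORT B =====
-- hand-rolled bisect_right: lo, hi bounds, mid = (lo+hi)//2.
-- xs.getD mid 0 is exact for Python's xs[mid]: the loop keeps lo < hi ≤ len(xs), so mid is in range.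
-- fuel is only a structural totality guard: each step shrinks hi - lo, and the
-- initial fuel len(xs) = hi - lo bounds the number of iterations.
def pvBSearch (value : Int) (xs : List Int) : Nat → Nat → Nat → Nat
  | 0, lo, _ => lo
  | fuel + 1, lo, hi =>
    if lo < hi then
      let mid := (lo + hi) / 2
      if xs.getD mid 0 ≤ value then pvBSearch value xs fuel (mid + 1) hi
      else pvBSearch value xs fuel lo mid
    else lo

def get_index_interval_containing_alt (value : Int) (interval_beginnings : List Int) : Option Int :=
  let lo := pvBSearch value interval_beginnings interval_beginnings.length 0 interval_beginnings.length
  if lo ≠ 0 then some ((lo : Int) - 1) else none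

-- ===== PRECONDITION & SPEC =====
-- Pre_ restricts to binary search's natural domain: the list is partitioned w.r.t. value
-- (every element ≤ value precedes every element > value; ascending interval beginnings —
-- the function's intended input — always satisfy this). On non-partitioned lists A's
-- linear-scan value is accidental and is excluded.
def Pre_get_index_interval_containing (value : Int) (interval_beginnings : List Int) : Prop :=
  (interval_beginnings.map (fun b => decide (b ≤ value))).Pairwise (fun p q => q ≤ p)
instance (value : Int) (interval_beginnings : List Int) : Decidable (Pre_get_index_interval_containing value interval_beginnings) := by unfold Pre_get_index_interval_containing; infer_instance

def pvWitness_get_index_interval_containing : Int × List Int := (5, [0, 3, 7, 7, 10])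

def Spec_get_index_interval_containing (value : Int) (interval_beginnings : List Int) (out : Option Int) : Prop := out = get_index_interval_containing_alt value interval_beginnings
instance (value : Int) (interval_beginnings : List Int) (out : Option Int) : Decidable (Spec_get_index_interval_containing value interval_beginnings out) := by unfold Spec_get_index_interval_containing; infer_instance

-- ===== CLAIM (what is proved, stated in full; the proofs are below) =====
def Claim_equal_get_index_interval_containing : Prop := ∀ (value : Int) (interval_beginnings : List Int), Dom_get_index_interval_containing value interval_beginnings → Pre_get_index_interval_containing value interval_beginnings → Spec_get_index_interval_containing value interval_beginnings (get_index_interval_containing value interval_beginnings)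

-- ===== LEMMAS AND PROOFS =====

-- length of the longest prefix of xs whose elements are ≤ value
def pvP (value : Int) (xs : List Int) : Nat := (xs.takeWhile (fun b => decide (b ≤ value))).length

theorem pvP_le (value : Int) (xs : List Int) : pvP value xs ≤ xs.length := by
  unfold pvP; exact (List.takeWhile_prefix _).length_le

theorem pvP_cons (value b : Int) (rest : List Int) :
    pvP value (b :: rest) = if b ≤ value then pvP value rest + 1 else 0 := by
  unfold pvP
  by_cases hb : b ≤ value
  · rw [List.takeWhile_cons_of_pos (by simpa using hb)]; simp [hb]
  · rw [List.takeWhile_cons_of_neg (by simpa using hb)]; simp [hb]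

theorem pvP_sat (value : Int) (xs : List Int) :
    ∀ i, i < pvP value xs → xs.getD i 0 ≤ value := by
  induction xs with
  | nil => simp [pvP]
  | cons b rest ih =>
    intro i hi
    rw [pvP_cons] at hi
    by_cases hb : b ≤ value
    · rw [if_pos hb] at hi
      cases i with
      | zero => simpa using hb
      | succ j => rw [List.getD_cons_succ]; exact ih j (by omega)
    · rw [if_neg hb] at hi; omega

theorem pvP_stop (value : Int) (xs : List Int) :
    pvP value xs < xs.length → value < xs.getD (pvP value xs) 0 := by
  induction xs with
  | nil => simp [pvP]
  | cons b rest ih =>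
    rw [pvP_cons]
    by_cases hb : b ≤ value
    · rw [if_pos hb]
      intro h
      rw [List.getD_cons_succ]
      exact ih (by simpa using h)
    · rw [if_neg hb]
      intro _
      rw [List.getD_cons_zero]
      omega

theorem pvP_unique (value : Int) (xs : List Int) (n : Nat) (hn : n ≤ xs.length)
    (h1 : ∀ i, i < n → xs.getD i 0 ≤ value)
    (h2 : n < xs.length → value < xs.getD n 0) : n = pvP value xs := by
  rcases Nat.lt_trichotomy n (pvP value xs) with h | h | h
  · have := pvP_sat value xs n h
    have := h2 (by have := pvP_le value xs; omega)
    omega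
  · exact h
  · have := h1 (pvP value xs) h
    have := pvP_stop value xs (by omega)
    omega

-- A's while loop computes the same prefix length
theorem pvLoopA_eq (value : Int) (xs : List Int) (i : Nat) :
    pvLoopA value xs i = i + pvP value (xs.drop i) := by
  rw [pvLoopA]
  split
  · next h =>
    rw [List.drop_eq_getElem_cons h]
    by_cases hv : value ≥ xs[i]
    · rw [if_pos hv, pvLoopA_eq value xs (i + 1)]
      unfold pvP
      rw [List.takeWhile_cons_of_pos (by simpa using hv)]
      simp [Nat.add_comm, Nat.add_assoc]
    · rw [if_neg hv]
      unfold pvP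
      rw [List.takeWhile_cons_of_neg (by simpa using hv)]
      simp
  · next h =>
    rw [List.drop_eq_nil_of_le (by omega)]
    simp [pvP]
termination_by xs.length - i

-- the partition precondition in getD form
theorem pvPart_getD (value : Int) (xs : List Int)
    (hp : (xs.map (fun b => decide (b ≤ value))).Pairwise (fun p q => q ≤ p)) :
    ∀ i j, i ≤ j → j < xs.length → xs.getD j 0 ≤ value → xs.getD i 0 ≤ value := by
  intro i j hij hj hle
  rcases Nat.eq_or_lt_of_le hij with rfl | hlt
  · exact hle
  · have h := List.pairwise_iff_getElem.mp hp i j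
      (by simpa using (by omega : i < xs.length)) (by simpa using hj) hlt
    simp only [List.getElem_map] at h
    rw [List.getD_eq_getElem _ _ (by omega)]
    rw [List.getD_eq_getElem _ _ hj] at hle
    have := h (by simpa using hle)
    simpa using this

-- B's binary search computes the prefix length on sorted input
theorem pvBSearch_eq (value : Int) (xs : List Int)
    (hp : (xs.map (fun b => decide (b ≤ value))).Pairwise (fun p q => q ≤ p)) :
    ∀ fuel lo hi, lo ≤ hi → hi ≤ xs.length → hi - lo ≤ fuel →
    (∀ i, i < lo → xs.getD i 0 ≤ value) →
    (∀ i, hi ≤ i → i < xs.length → value < xs.getD i 0) →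
    pvBSearch value xs fuel lo hi = pvP value xs := by
  intro fuel
  induction fuel with
  | zero =>
    intro lo hi hlohi hhile hfuel hlo hhi
    have : lo = hi := by omega
    subst this
    exact pvP_unique value xs lo hhile (fun i hi' => hlo i hi')
      (fun hlen => hhi lo (le_refl _) hlen)
  | succ fuel ih =>
    intro lo hi hlohi hhile hfuel hlo hhi
    rw [pvBSearch]
    split
    · next h =>
      set mid := (lo + hi) / 2 with hmid
      have hmlo : lo ≤ mid := by omega
      have hmhi : mid < hi := by omega
      by_cases hv : xs.getD mid 0 ≤ value
      · rw [if_pos hv]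
        refine ih (mid + 1) hi (by omega) hhile (by omega) ?_ hhi
        intro i hi'
        rcases Nat.lt_or_ge i lo with h' | h'
        · exact hlo i h'
        · exact pvPart_getD value xs hp i mid (by omega) (by omega) hv
      · rw [if_neg hv]
        refine ih lo mid (by omega) (by omega) (by omega) hlo ?_
        intro i hi' hilen
        by_contra hcon
        exact hv (pvPart_getD value xs hp mid i hi' hilen (by omega))
    · next h =>
      have : lo = hi := by omega
      subst this
      exact pvP_unique value xs lo hhile (fun i hi' => hlo i hi')
        (fun hlen => hhi lo (le_refl _) hlen)

-- ===== VERDICT (by name: the statement is the Claim_ definition above) =====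
theorem get_index_interval_containing_spec : Claim_equal_get_index_interval_containing := by
  intro value xs _ hpre
  unfold Spec_get_index_interval_containing get_index_interval_containing get_index_interval_containing_alt
  rw [pvBSearch_eq value xs hpre xs.length 0 xs.length (Nat.zero_le _) (le_refl _) (by omega)
      (by omega) (fun i h1 h2 => by omega), pvLoopA_eq]
  simp only [List.drop_zero, Nat.zero_add]
  by_cases hz : pvP value xs = 0
  · simp [hz]
  · have h1 : ((pvP value xs : Int) - 1) ≠ -1 := by omega
    simp [hz, h1]
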